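-- pv_equiv track=rewrite | github.com/bh3r1th/ExecLint | execlint/analyzers/repo_triage.py | _extract_entrypoints
-- ===== SOURCE A (Python) =====
-- ENTRYPOINT_FILES = ("train.py", "infer.py", "inference.py", "demo.py", "app.py", "smoke_test.py")
--
-- def _extract_entrypoints(paths: list[str]) -> list[str]:
--     lowered = [p.lower() for p in paths]
--     hits = [p for p in ENTRYPOINT_FILES if any(path.endswith(p) for path in lowered)]
--     if any(path.endswith(".ipynb") for path in lowered):
--         hits.append("notebook")
--     if any(path.startswith("scripts/") for path in lowered):
--         hits.append("scripts/")
--     return sorted(set(hits))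
-- ===== SOURCE B (Python) =====
-- # Table-driven: one pre-sorted marker table, a parallel boolean flag vector
-- # updated in a single pass over the paths, output emitted by filtering the
-- # table -- no set, no dedup, no runtime sort.
-- _MARKERS = (
--     ("app.py", False, "app.py"),
--     ("demo.py", False, "demo.py"),
--     ("infer.py", False, "infer.py"),
--     ("inference.py", False, "inference.py"),
--     ("notebook", False, ".ipynb"),
--     ("scripts/", True, "scripts/"),
--     ("smoke_test.py", False, "smoke_test.py"),
--     ("train.py", False, "train.py"),
-- )
--
-- def _extract_entrypoints(paths):
--     flags = [False] * len(_MARKERS)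
--     for p in paths:
--         lp = p.lower()
--         flags = [f or (lp.startswith(pat) if pre else lp.endswith(pat))
--                  for f, (_name, pre, pat) in zip(flags, _MARKERS)]
--     return [name for (name, _pre, _pat), f in zip(_MARKERS, flags) if f]
-- ===== Notes on version B (the rewrite author's own statement) =====
-- stated objective: alternative
-- what changed: Replaces A's build-hit-list/dedup-with-set/runtime-sort pipeline by a table-driven scheme: a pre-sorted table of all eight markers with a parallel boolean flag vector updated in a single pass over the paths, and the output emitted by filtering the table by its flags, eliminating set construction and sorting entirely.
import Mathlib
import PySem

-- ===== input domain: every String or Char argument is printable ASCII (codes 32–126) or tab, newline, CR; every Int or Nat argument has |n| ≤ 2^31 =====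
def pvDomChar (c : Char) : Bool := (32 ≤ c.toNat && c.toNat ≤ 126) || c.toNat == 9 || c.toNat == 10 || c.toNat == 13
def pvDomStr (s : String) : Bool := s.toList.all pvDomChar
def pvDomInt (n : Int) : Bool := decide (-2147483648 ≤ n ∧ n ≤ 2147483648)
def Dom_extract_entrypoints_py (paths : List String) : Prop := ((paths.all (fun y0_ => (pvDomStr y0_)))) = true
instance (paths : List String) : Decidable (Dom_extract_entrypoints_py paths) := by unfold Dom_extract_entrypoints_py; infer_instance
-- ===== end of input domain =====

-- B is table-driven: a pre-sorted marker table with a parallel boolean flag vector updated in one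
-- pass, output emitted by filtering the table — no set construction and no runtime sort.

def ENTRYPOINT_FILES_py : List String :=
  ["train.py", "infer.py", "inference.py", "demo.py", "app.py", "smoke_test.py"]

-- ===== PORT A =====
def extract_entrypoints_py (paths : List String) : List String :=
  let lowered := paths.map PySem.Str.lower
  let hits := ENTRYPOINT_FILES_py.filter
    (fun p => lowered.any (fun path => PySem.Str.endswith path p))
  let hits := if lowered.any (fun path => PySem.Str.endswith path ".ipynb")
    then hits ++ ["notebook"] else hits
  let hits := if lowered.any (fun path => PySem.Str.startswith path "scripts/")
    then hits ++ ["scripts/"] else hits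
  PySem.List.sorted (PySem.Set.ofList hits) (fun x => x) false

-- ===== PORT B =====
-- _MARKERS: (emitted name, pattern-is-prefix?, pattern), lexicographically pre-sorted by name
def pvMarkers : List (String × Bool × String) :=
  [("app.py", false, "app.py"), ("demo.py", false, "demo.py"),
   ("infer.py", false, "infer.py"), ("inference.py", false, "inference.py"),
   ("notebook", false, ".ipynb"), ("scripts/", true, "scripts/"),
   ("smoke_test.py", false, "smoke_test.py"), ("train.py", false, "train.py")]

-- lp.startswith(pat) if pre else lp.endswith(pat)
def pvTrig (lp : String) (m : String × Bool × String) : Bool :=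
  if m.2.1 then PySem.Str.startswith lp m.2.2 else PySem.Str.endswith lp m.2.2

def extract_entrypoints_py_alt (paths : List String) : List String :=
  let flags := paths.foldl
    (fun flags p =>
      (flags.zip pvMarkers).map (fun fm => fm.1 || pvTrig (PySem.Str.lower p) fm.2))
    (pvMarkers.map (fun _ => false))
  ((pvMarkers.zip flags).filter (fun mf => mf.2)).map (fun mf => mf.1.1)

-- ===== PRECONDITION & SPEC =====
def Spec_extract_entrypoints_py (paths : List String) (out : List String) : Prop := out = extract_entrypoints_py_alt paths
instance (paths : List String) (out : List String) : Decidable (Spec_extract_entrypoints_py paths out) := by unfold Spec_extract_entrypoints_py; infer_instance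

-- ===== CLAIM (what is proved, stated in full; the proofs are below) =====
def Claim_equal_extract_entrypoints_py : Prop := ∀ (paths : List String), Dom_extract_entrypoints_py paths → Spec_extract_entrypoints_py paths (extract_entrypoints_py paths)

-- ===== LEMMAS AND PROOFS =====

set_option maxHeartbeats 3200000

theorem pv_zip_map_left {α β : Type} (l : List α) (g : α → β) :
    (l.map g).zip l = l.map (fun x => (g x, x)) := by
  induction l with
  | nil => rfl
  | cons a t ih => simp [ih]

theorem pv_zip_map_right {α β : Type} (l : List α) (g : α → β) :
    l.zip (l.map g) = l.map (fun x => (x, g x)) := by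
  induction l with
  | nil => rfl
  | cons a t ih => simp [ih]

-- flag-vector invariant: after folding the paths, each table entry's flag says
-- whether any path (lowered) triggers that marker
theorem pv_flags_inv (l : List (String × Bool × String)) (paths : List String)
    (g : (String × Bool × String) → Bool) :
    paths.foldl
      (fun flags p => (flags.zip l).map (fun fm => fm.1 || pvTrig (PySem.Str.lower p) fm.2))
      (l.map g)
    = l.map (fun m => g m || paths.any (fun p => pvTrig (PySem.Str.lower p) m)) := by
  induction paths generalizing g with
  | nil => simp
  | cons a t ih =>
    rw [List.foldl_cons, pv_zip_map_left, List.map_map]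
    have h1 : ((fun fm : Bool × (String × Bool × String) => fm.1 || pvTrig (PySem.Str.lower a) fm.2) ∘
        fun x => (g x, x)) = fun m => g m || pvTrig (PySem.Str.lower a) m := by
      funext m; rfl
    rw [h1, ih (fun m => g m || pvTrig (PySem.Str.lower a) m)]
    simp [Bool.or_assoc]

-- B's output is the table filtered by "some path triggers this marker"
theorem pvB_eq (paths : List String) :
    extract_entrypoints_py_alt paths =
      (pvMarkers.filter (fun m => paths.any (fun p => pvTrig (PySem.Str.lower p) m))).map
        (fun m => m.1) := by
  unfold extract_entrypoints_py_alt
  dsimp only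
  rw [pv_flags_inv, pv_zip_map_right]
  simp [List.filter_map, Function.comp_def]

-- the table's emitted names are strictly increasing
theorem pvMarkers_names : pvMarkers.Pairwise (fun a b => a.1 < b.1) := by
  simp only [pvMarkers, List.pairwise_cons, List.mem_cons, List.not_mem_nil,
    forall_eq_or_imp, String.lt_iff_toList_lt]
  refine ⟨⟨?_,?_,?_,?_,?_,?_,?_⟩,⟨?_,?_,?_,?_,?_,?_⟩,⟨?_,?_,?_,?_,?_⟩,⟨?_,?_,?_,?_⟩,
    ⟨?_,?_,?_⟩,⟨?_,?_⟩,?_,?_⟩ <;> first | (simp; decide) | simp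

theorem pvB_pairwise (q : (String × Bool × String) → Bool) :
    ((pvMarkers.filter q).map (fun m => m.1)).Pairwise (· < ·) :=
  List.pairwise_map.mpr (List.Pairwise.sublist List.filter_sublist pvMarkers_names)

theorem pvB_nodup (q : (String × Bool × String) → Bool) :
    ((pvMarkers.filter q).map (fun m => m.1)).Nodup :=
  (pvB_pairwise q).imp ne_of_lt

theorem pv_mem_A (paths : List String) (y : String) :
    (y ∈ PySem.Set.ofList (
      let lowered := paths.map PySem.Str.lower
      let hits := ENTRYPOINT_FILES_py.filter
        (fun p => lowered.any (fun path => PySem.Str.endswith path p))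
      let hits := if lowered.any (fun path => PySem.Str.endswith path ".ipynb")
        then hits ++ ["notebook"] else hits
      if lowered.any (fun path => PySem.Str.startswith path "scripts/")
        then hits ++ ["scripts/"] else hits)) ↔
    (y ∈ (pvMarkers.filter (fun m => paths.any (fun p => pvTrig (PySem.Str.lower p) m))).map
        (fun m => m.1)) := by
  simp only [PySem.Set.mem_ofList]
  simp only [List.mem_map, List.mem_filter, pvMarkers, List.mem_cons, List.not_mem_nil,
    or_false, pvTrig]
  simp only [List.any_map, Function.comp_def, ENTRYPOINT_FILES_py]
  by_cases h7 : (paths.any fun x => PySem.Str.endswith (PySem.Str.lower x) ".ipynb") = true <;>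
  by_cases h8 : (paths.any fun x => PySem.Str.startswith (PySem.Str.lower x) "scripts/") = true <;>
    simp only [h7, h8, if_true, List.mem_append, List.mem_filter, List.mem_cons,
      List.not_mem_nil, or_false, Bool.not_eq_true, if_neg, exists_eq_or_imp] <;>
    aesop

-- ===== VERDICT (by name: the statement is the Claim_ definition above) =====
theorem extract_entrypoints_py_spec : Claim_equal_extract_entrypoints_py := by
  intro paths _
  unfold Spec_extract_entrypoints_py extract_entrypoints_py
  rw [pvB_eq]
  apply PySem.List.sorted_eq_of_perm_of_pairwise_lt
  · apply (List.perm_ext_iff_of_nodup (pvB_nodup _) (PySem.Set.nodup_ofList _)).2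
    intro y
    exact (pv_mem_A paths y).symm
  · exact pvB_pairwise _
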